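-- pv_equiv track=rewrite | github.com/renormalizable/ircbot | output.py | ircescape
-- ===== SOURCE A (Python) =====
-- def ircescape(t):
--     table = [
--         ('\\x0f', '\x0f'),
--         ('\\x03', '\x03'),
--         ('\\x02', '\x02'),
--         ('\\x1d', '\x1d'),
--         ('\\x1f', '\x1f'),
--     ]
--     for (s, e) in table:
--         t = t.replace(s, e)
--     return t
-- ===== SOURCE B (Python) =====
-- def ircescape(t):
--     table = {'0f': '\x0f', '03': '\x03', '02': '\x02', '1d': '\x1d', '1f': '\x1f'}
--     out = []
--     i = 0
--     n = len(t)
--     while i < n: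
--         e = table.get(t[i + 2:i + 4]) if t[i:i + 2] == '\\x' else None
--         if e is not None:
--             out.append(e)
--             i += 4
--         else:
--             out.append(t[i])
--             i += 1
--     return ''.join(out)
-- ===== Notes on version B (the rewrite author's own statement) =====
-- stated objective: alternative
-- what changed: B decodes the string in a single left-to-right scan with a code table (emit the mapped control byte on a '\x..' match, else copy one character), instead of A's five sequential full-string str.replace passes.
import Mathlib
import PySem

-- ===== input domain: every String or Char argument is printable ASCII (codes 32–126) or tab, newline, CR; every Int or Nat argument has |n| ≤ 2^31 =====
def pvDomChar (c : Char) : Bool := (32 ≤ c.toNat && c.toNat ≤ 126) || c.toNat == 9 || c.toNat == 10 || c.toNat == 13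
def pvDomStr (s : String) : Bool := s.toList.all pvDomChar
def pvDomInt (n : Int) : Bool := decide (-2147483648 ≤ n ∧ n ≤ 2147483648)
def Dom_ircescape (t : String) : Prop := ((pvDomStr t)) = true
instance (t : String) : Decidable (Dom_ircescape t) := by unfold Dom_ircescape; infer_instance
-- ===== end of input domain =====

-- B replaces A's five sequential full-string replace passes by one left-to-right table-driven scan (alternative decomposition, same result).

-- ===== PORT A =====
def ircescape (t : String) : String :=
  let table : List (String × String) :=
    [("\\x0f", "\x0F"), ("\\x03", "\x03"), ("\\x02", "\x02"), ("\\x1d", "\x1D"), ("\\x1f", "\x1F")]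
  table.foldl (fun acc se => PySem.Str.replace acc se.1 se.2) t

-- ===== PORT B =====
-- B's dict: two-character escape code ↦ control character
def escTable : List ((Char × Char) × Char) :=
  [(('0', 'f'), '\x0F'), (('0', '3'), '\x03'), (('0', '2'), '\x02'), (('1', 'd'), '\x1D'), (('1', 'f'), '\x1F')]

-- B's per-position test: `table.get(t[i+2:i+4]) if t[i:i+2] == '\\x' else None`, paired with the rest of the input
def escHead : List Char → Option (Char × List Char)
  | '\\' :: 'x' :: a :: b :: r => (escTable.lookup (a, b)).map (fun e => (e, r))
  | _ => none

theorem escHead_some_length {l : List Char} {e : Char} {r : List Char}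
    (h : escHead l = some (e, r)) : r.length + 4 = l.length := by
  unfold escHead at h
  split at h
  · simp only [Option.map_eq_some_iff] at h
    obtain ⟨_, _, h2⟩ := h
    cases h2
    simp
  · exact absurd h (by simp)

-- B's while loop: emit the decoded byte and skip 4, or copy one character
def escGo (l : List Char) : List Char :=
  match l with
  | [] => []
  | c :: r =>
    match h : escHead (c :: r) with
    | some (e, r') => e :: escGo r'
    | none => c :: escGo r
termination_by l.length
decreasing_by
  · have := escHead_some_length h; simp at this ⊢; omega
  · simp

def ircescape_alt (t : String) : String := String.ofList (escGo t.toList)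

-- ===== PRECONDITION & SPEC =====
def Spec_ircescape (t : String) (out : String) : Prop := out = ircescape_alt t
instance (t : String) (out : String) : Decidable (Spec_ircescape t out) := by unfold Spec_ircescape; infer_instance

-- ===== CLAIM (what is proved, stated in full; the proofs are below) =====
def Claim_equal_ircescape : Prop := ∀ (t : String), Dom_ircescape t → Spec_ircescape t (ircescape t)

-- ===== LEMMAS AND PROOFS =====

-- fuel-free characterisation of one pass of PySem.Chars.replace with a 4-char pattern and 1-char replacement
def rep (a b c d e : Char) (l : List Char) : List Char :=
  match l with
  | [] => []
  | x :: t =>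
    if [a, b, c, d].isPrefixOf (x :: t) then e :: rep a b c d e (t.drop 3)
    else x :: rep a b c d e t
termination_by l.length
decreasing_by
  · simp
  · simp

theorem rep_nil (a b c d e : Char) : rep a b c d e [] = [] := by simp [rep]

theorem rep_match (a b c d e : Char) (t : List Char) :
    rep a b c d e (a :: b :: c :: d :: t) = e :: rep a b c d e t := by
  rw [rep, if_pos (by simp [List.isPrefixOf])]
  simp

theorem rep_no {a b c d : Char} (e : Char) {x : Char} {t : List Char}
    (h : ([a, b, c, d].isPrefixOf (x :: t)) = false) :
    rep a b c d e (x :: t) = x :: rep a b c d e t := by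
  rw [rep]; simp [h]

theorem rep_ne {a : Char} (b c d e : Char) {x : Char} (t : List Char) (h : x ≠ a) :
    rep a b c d e (x :: t) = x :: rep a b c d e t := by
  apply rep_no; simp [List.isPrefixOf, Ne.symm h]

theorem go_eq_rep (a b c d e : Char) :
    ∀ (fuel : Nat) (l acc : List Char), l.length ≤ fuel →
      PySem.Chars.replace.go [a, b, c, d] [e] fuel l acc = acc.reverse ++ rep a b c d e l := by
  intro fuel
  induction fuel with
  | zero =>
    intro l acc hl
    have : l = [] := List.eq_nil_of_length_eq_zero (Nat.le_zero.mp hl)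
    subst this
    simp [PySem.Chars.replace.go, rep]
  | succ n ih =>
    intro l acc h
    cases l with
    | nil => simp [PySem.Chars.replace.go, rep]
    | cons x t =>
      rw [PySem.Chars.replace.go]
      by_cases hpre : ([a, b, c, d].isPrefixOf (x :: t)) = true
      · have hlen : 4 ≤ (x :: t).length := by
          have := List.IsPrefix.length_le (List.isPrefixOf_iff_prefix.mp hpre)
          simpa using this
        simp only [hpre, if_true]
        have : (x :: t).drop 4 = t.drop 3 := by simp
        rw [show ([a,b,c,d] : List Char).length = 4 from rfl, this,
            ih (t.drop 3) ([e].reverse ++ acc) (by simp at hlen h ⊢; omega)]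
        rw [rep, if_pos hpre]
        simp
      · simp only [hpre]
        rw [ih t (x :: acc) (by simp at h ⊢; omega), rep_no e (Bool.eq_false_iff.mpr hpre)]
        simp

theorem replace_eq_rep (a b c d e : Char) (l : List Char) :
    PySem.Chars.replace l [a, b, c, d] [e] = rep a b c d e l := by
  rw [PySem.Chars.replace]
  simp only [List.isEmpty_cons, if_false, Bool.false_eq_true]
  simpa using go_eq_rep a b c d e l.length l [] le_rfl

-- the replacement character blocks new matches: a pattern p avoiding e survives one pass backwards
theorem prefix_rep (a b c d e : Char) :
    ∀ (n : Nat) (p l : List Char), e ∉ p → l.length ≤ n →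
      p <+: rep a b c d e l → p <+: l := by
  intro n
  induction n with
  | zero =>
    intro p l he h hp
    have : l = [] := List.eq_nil_of_length_eq_zero (Nat.le_zero.mp h)
    subst this
    simpa [rep] using hp
  | succ n ih =>
    intro p l he h hp
    cases l with
    | nil => simpa [rep] using hp
    | cons x t =>
      by_cases hpre : ([a, b, c, d].isPrefixOf (x :: t)) = true
      · rw [rep, if_pos hpre] at hp
        cases p with
        | nil => exact List.nil_prefix
        | cons q p' =>
          rw [List.cons_prefix_cons] at hp
          exact absurd (hp.1 ▸ List.mem_cons_self) he
      · rw [rep_no e (Bool.eq_false_iff.mpr hpre)] at hp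
        cases p with
        | nil => exact List.nil_prefix
        | cons q p' =>
          rw [List.cons_prefix_cons] at hp
          rw [List.cons_prefix_cons]
          refine ⟨hp.1, ih p' t (fun hm => he (List.mem_cons_of_mem _ hm)) (by simp at h ⊢; omega) hp.2⟩

-- the five passes of A, outermost last
def chainA (l : List Char) : List Char :=
  rep '\\' 'x' '1' 'f' '\x1F' (rep '\\' 'x' '1' 'd' '\x1D' (rep '\\' 'x' '0' '2' '\x02'
    (rep '\\' 'x' '0' '3' '\x03' (rep '\\' 'x' '0' 'f' '\x0F' l))))

theorem escHead_of_lookup {a2 b2 : Char} {e : Char} (hm : escTable.lookup (a2, b2) = some e)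
    {c : Char} {t : List Char} (hp : ['\\', 'x', a2, b2] <+: (c :: t)) :
    escHead (c :: t) = some (e, t.drop 3) := by
  obtain ⟨r, hr⟩ := hp
  simp only [List.cons_append, List.nil_append, List.cons.injEq] at hr
  obtain ⟨h1, h2⟩ := hr
  subst h1; subst h2
  simp [escHead, hm]

theorem lookup_escTable {a b : Char} {e : Char} (h : escTable.lookup (a, b) = some e) :
    (a = '0' ∧ b = 'f' ∧ e = '\x0F') ∨ (a = '0' ∧ b = '3' ∧ e = '\x03') ∨
    (a = '0' ∧ b = '2' ∧ e = '\x02') ∨ (a = '1' ∧ b = 'd' ∧ e = '\x1D') ∨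
    (a = '1' ∧ b = 'f' ∧ e = '\x1F') := by
  simp only [escTable, List.lookup] at h
  repeat' split at h
  all_goals simp_all [Prod.ext_iff]
  all_goals exact h.symm

theorem escHead_some_shape {l : List Char} {e : Char} {r : List Char}
    (h : escHead l = some (e, r)) :
    ∃ a b, l = '\\' :: 'x' :: a :: b :: r ∧ escTable.lookup (a, b) = some e := by
  unfold escHead at h
  split at h
  · simp only [Option.map_eq_some_iff] at h
    obtain ⟨e', he', heq⟩ := h
    cases heq
    exact ⟨_, _, rfl, he'⟩
  · exact absurd h (by simp)

theorem escGo_some {c : Char} {r : List Char} {e : Char} {r' : List Char}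
    (h : escHead (c :: r) = some (e, r')) : escGo (c :: r) = e :: escGo r' := by
  rw [escGo]
  split <;> simp_all

theorem escGo_none {c : Char} {r : List Char}
    (h : escHead (c :: r) = none) : escGo (c :: r) = c :: escGo r := by
  rw [escGo]
  split <;> simp_all

-- pass a matched-elsewhere 4-character block through one non-matching pass
theorem rep_skip {a b c d : Char} (e : Char) {w x y z : Char} {X : List Char}
    (h1 : ([a, b, c, d].isPrefixOf (w :: x :: y :: z :: X)) = false)
    (h2 : x ≠ a) (h3 : y ≠ a) (h4 : z ≠ a) :
    rep a b c d e (w :: x :: y :: z :: X) = w :: x :: y :: z :: rep a b c d e X := by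
  rw [rep_no e h1, rep_ne _ _ _ _ _ h2, rep_ne _ _ _ _ _ h3, rep_ne _ _ _ _ _ h4]

theorem chain_eq : ∀ (n : Nat) (l : List Char), l.length ≤ n → chainA l = escGo l := by
  intro n
  induction n with
  | zero =>
    intro l h
    have : l = [] := List.eq_nil_of_length_eq_zero (Nat.le_zero.mp h)
    subst this
    simp [chainA, rep_nil, escGo]
  | succ n ih =>
    intro l h
    cases l with
    | nil => simp [chainA, rep_nil, escGo]
    | cons c t =>
      cases hh : escHead (c :: t) with
      | some er =>
        obtain ⟨e, r⟩ := er
        obtain ⟨a, b, hshape, hlk⟩ := escHead_some_shape hh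
        have hr : r.length ≤ n := by
          have := escHead_some_length hh; simp at this h; omega
        rw [escGo_some hh]
        simp only [List.cons.injEq] at hshape
        obtain ⟨hc, ht⟩ := hshape
        subst hc; subst ht
        rcases lookup_escTable hlk with ⟨ha, hb, he⟩ | ⟨ha, hb, he⟩ | ⟨ha, hb, he⟩ | ⟨ha, hb, he⟩ | ⟨ha, hb, he⟩ <;>
          subst ha <;> subst hb <;> subst he <;>
          unfold chainA <;>
          (repeat first
            | rw [rep_match]
            | rw [rep_skip]
            | rw [rep_ne]) <;>
          first
            | exact congrArg _ (ih r hr)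
            | decide
            | simp [List.isPrefixOf]
      | none =>
        -- no escape starts here: every pass copies the head character
        have np : ∀ (a2 b2 e2 : Char), escTable.lookup (a2, b2) = some e2 →
            ¬ (['\\', 'x', a2, b2] <+: (c :: t)) := by
          intro a2 b2 e2 hm hp
          rw [escHead_of_lookup hm hp] at hh
          exact absurd hh (by simp)
        have np2 : ∀ (a2 b2 e2 : Char), escTable.lookup (a2, b2) = some e2 →
            ∀ X : List Char, (['x', a2, b2] <+: X → ['x', a2, b2] <+: t) →
              ([ '\\', 'x', a2, b2].isPrefixOf (c :: X)) = false := by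
          intro a2 b2 e2 hm X hX
          by_contra hx
          rw [Bool.not_eq_false, List.isPrefixOf_iff_prefix, List.cons_prefix_cons] at hx
          exact np a2 b2 e2 hm (List.cons_prefix_cons.mpr ⟨hx.1, hX hx.2⟩)
        rw [escGo_none hh]
        unfold chainA
        rw [rep_no _ (np2 '0' 'f' _ rfl t (fun hx => hx)),
            rep_no _ (np2 '0' '3' _ rfl _ (fun hx =>
              prefix_rep _ _ _ _ _ t.length _ t (by decide) le_rfl hx)),
            rep_no _ (np2 '0' '2' _ rfl _ (fun hx =>
              prefix_rep _ _ _ _ _ t.length _ t (by decide) le_rfl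
                (prefix_rep _ _ _ _ _ (rep '\\' 'x' '0' 'f' '\x0F' t).length _ _ (by decide) le_rfl hx))),
            rep_no _ (np2 '1' 'd' _ rfl _ (fun hx =>
              prefix_rep _ _ _ _ _ t.length _ t (by decide) le_rfl
                (prefix_rep _ _ _ _ _ (rep '\\' 'x' '0' 'f' '\x0F' t).length _ _ (by decide) le_rfl
                  (prefix_rep _ _ _ _ _ (rep '\\' 'x' '0' '3' '\x03' (rep '\\' 'x' '0' 'f' '\x0F' t)).length _ _ (by decide) le_rfl hx)))),
            rep_no _ (np2 '1' 'f' _ rfl _ (fun hx =>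
              prefix_rep _ _ _ _ _ t.length _ t (by decide) le_rfl
                (prefix_rep _ _ _ _ _ (rep '\\' 'x' '0' 'f' '\x0F' t).length _ _ (by decide) le_rfl
                  (prefix_rep _ _ _ _ _ (rep '\\' 'x' '0' '3' '\x03' (rep '\\' 'x' '0' 'f' '\x0F' t)).length _ _ (by decide) le_rfl
                    (prefix_rep _ _ _ _ _ (rep '\\' 'x' '0' '2' '\x02' (rep '\\' 'x' '0' '3' '\x03' (rep '\\' 'x' '0' 'f' '\x0F' t))).length _ _ (by decide) le_rfl hx)))))]
        exact congrArg _ (ih t (by simp at h; omega))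

-- ===== VERDICT (by name: the statement is the Claim_ definition above) =====
theorem ircescape_spec : Claim_equal_ircescape := by
  intro t _
  unfold Spec_ircescape ircescape ircescape_alt
  apply String.toList_injective
  simp only [List.foldl, PySem.Str.toList_replace, String.toList_ofList]
  rw [show ("\\x0f" : String).toList = ['\\', 'x', '0', 'f'] from rfl,
      show ("\x0F" : String).toList = ['\x0F'] from rfl,
      show ("\\x03" : String).toList = ['\\', 'x', '0', '3'] from rfl,
      show ("\x03" : String).toList = ['\x03'] from rfl,
      show ("\\x02" : String).toList = ['\\', 'x', '0', '2'] from rfl,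
      show ("\x02" : String).toList = ['\x02'] from rfl,
      show ("\\x1d" : String).toList = ['\\', 'x', '1', 'd'] from rfl,
      show ("\x1D" : String).toList = ['\x1D'] from rfl,
      show ("\\x1f" : String).toList = ['\\', 'x', '1', 'f'] from rfl,
      show ("\x1F" : String).toList = ['\x1F'] from rfl]
  rw [replace_eq_rep, replace_eq_rep, replace_eq_rep, replace_eq_rep, replace_eq_rep]
  exact chain_eq t.toList.length t.toList le_rfl
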